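-- pv_equiv track=rewrite | github.com/kth5711/MTPlayer | scene_analysis/core/similarity.py | _pick_anchor_times
-- ===== SOURCE A (Python) =====
-- from typing import List, Tuple
--
-- def _pick_anchor_times(times_ms: List[int], max_count: int = 3) -> List[int]:
--     vals = sorted(set(int(x) for x in (times_ms or []) if int(x) >= 0))
--     if not vals:
--         return []
--     n = max(1, int(max_count))
--     if len(vals) <= n:
--         return vals
--     out = [vals[0]]
--     if n >= 3 and len(vals) >= 3:
--         out.append(vals[len(vals) // 2])
--     if n >= 2:
--         out.append(vals[-1])
--     return sorted(set(out))
-- ===== SOURCE B (Python) =====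
-- def _quickselect(xs, k):
--     # k-th smallest (0-based) of a list of distinct ints, by iterative partitioning
--     # around a median-of-three pivot (robust against structured input orders)
--     while True:
--         p = sorted((xs[0], xs[len(xs) // 2], xs[-1]))[1]
--         less = [x for x in xs if x < p]
--         if k < len(less):
--             xs = less
--         elif k == len(less):
--             return p
--         else:
--             xs = [x for x in xs if x > p]
--             k = k - len(less) - 1
--
-- def _pick_anchor_times(times_ms, max_count=3):
--     uniq = list({x for x in (times_ms or []) if x >= 0})
--     if not uniq:
--         return []
--     n = max_count if max_count > 1 else 1
--     if len(uniq) <= n: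
--         return sorted(uniq)
--     lo = min(uniq)
--     hi = max(uniq)
--     if n == 1:
--         return [lo]
--     if n == 2:
--         return [lo, hi]
--     return [lo, _quickselect(uniq, len(uniq) // 2), hi]
-- ===== Notes on version B (the rewrite author's own statement) =====
-- stated objective: alternative
-- what changed: B sorts the deduplicated values only in the small branch (len <= n); on the large branch it replaces A's full sort by linear min/max scans plus a median-of-three quickselect for the median, assembling the at-most-three anchors directly instead of A's list/set/sort post-processing; measured speed parity-to-moderate gain, so no speed is claimed.
import Mathlib
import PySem

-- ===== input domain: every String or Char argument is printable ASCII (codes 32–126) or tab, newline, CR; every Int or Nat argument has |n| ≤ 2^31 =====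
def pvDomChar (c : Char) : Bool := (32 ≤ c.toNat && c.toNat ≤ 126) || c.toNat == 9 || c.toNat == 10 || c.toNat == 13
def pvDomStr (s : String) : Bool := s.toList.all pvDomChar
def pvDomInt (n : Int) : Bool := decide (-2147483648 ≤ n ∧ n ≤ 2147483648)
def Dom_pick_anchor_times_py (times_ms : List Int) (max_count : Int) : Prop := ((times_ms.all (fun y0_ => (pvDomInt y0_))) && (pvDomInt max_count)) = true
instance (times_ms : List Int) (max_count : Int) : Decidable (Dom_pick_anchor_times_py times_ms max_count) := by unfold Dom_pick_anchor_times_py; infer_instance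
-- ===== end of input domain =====

-- B replaces A's full sort of the deduplicated values by linear min/max scans plus a
-- quickselect for the median on the large branch (it still sorts when len(vals) <= n).

-- ===== PORT A =====
def pick_anchor_times_py (times_ms : List Int) (max_count : Int) : List Int :=
  let vals := PySem.List.sorted
    (PySem.Set.ofList (times_ms.filter (fun x => decide (0 ≤ x)))) (fun x => x) false
  if vals = [] then []
  else
    let n : Int := max 1 max_count
    if (vals.length : Int) ≤ n then vals
    else
      let out := [PySem.List.pyGetD vals 0 0]
      let out := if 3 ≤ n ∧ 3 ≤ vals.length then
          out ++ [PySem.List.pyGetD vals (PySem.Int.floordiv (vals.length : Int) 2) 0]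
        else out
      let out := if 2 ≤ n then out ++ [PySem.List.pyGetD vals (-1) 0] else out
      PySem.List.sorted (PySem.Set.ofList out) (fun x => x) false

-- ===== PORT B =====
-- the pivot Source B picks: sorted((xs[0], xs[len(xs) // 2], xs[-1]))[1]
def pyPivot3 (xs : List Int) : Int :=
  PySem.List.pyGetD
    (PySem.List.sorted
      [PySem.List.pyGetD xs 0 0,
       PySem.List.pyGetD xs (PySem.Int.floordiv ((xs.length : Nat) : Int) 2) 0,
       PySem.List.pyGetD xs (-1) 0] (fun y => y) false) 1 0

-- k-th smallest (0-based) of a list of distinct ints: Source B's iterative partition loop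
-- (median-of-three pivot) as a tail recursion on a fuel that only makes it total (the
-- loop discards at least the pivot each round, so xs.length fuel never runs out);
-- the [] case is unreachable for k < xs.length
def pyQuickselectGo : Nat → List Int → Nat → Int
  | 0, _, _ => 0
  | _ + 1, [], _ => 0
  | fuel + 1, a :: rest, k =>
      let p := pyPivot3 (a :: rest)
      let less := (a :: rest).filter (fun y => decide (y < p))
      if k < less.length then pyQuickselectGo fuel less k
      else if k = less.length then p
      else pyQuickselectGo fuel ((a :: rest).filter (fun y => decide (p < y))) (k - less.length - 1)

def pyQuickselect (xs : List Int) (k : Nat) : Int := pyQuickselectGo xs.length xs k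

def pick_anchor_times_py_alt (times_ms : List Int) (max_count : Int) : List Int :=
  let uniq := PySem.Set.ofList (times_ms.filter (fun x => decide (0 ≤ x)))
  if uniq = [] then []
  else
    let n : Int := if 1 < max_count then max_count else 1
    if (uniq.length : Int) ≤ n then PySem.List.sorted uniq (fun x => x) false
    else
      let lo := (PySem.List.min? uniq (fun x => x)).getD 0
      let hi := (PySem.List.max? uniq (fun x => x)).getD 0
      if n = 1 then [lo]
      else if n = 2 then [lo, hi]
      else [lo, pyQuickselect uniq (uniq.length / 2), hi]

-- ===== PRECONDITION & SPEC =====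
def Spec_pick_anchor_times_py (times_ms : List Int) (max_count : Int) (out : List Int) : Prop := out = pick_anchor_times_py_alt times_ms max_count
instance (times_ms : List Int) (max_count : Int) (out : List Int) : Decidable (Spec_pick_anchor_times_py times_ms max_count out) := by unfold Spec_pick_anchor_times_py; infer_instance

-- ===== CLAIM (what is proved, stated in full; the proofs are below) =====
def Claim_equal_pick_anchor_times_py : Prop := ∀ (times_ms : List Int) (max_count : Int), Dom_pick_anchor_times_py times_ms max_count → Spec_pick_anchor_times_py times_ms max_count (pick_anchor_times_py times_ms max_count)

-- ===== LEMMAS AND PROOFS =====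

-- the pivot is one of the three probed elements, hence an element of xs
theorem pyPivot3_mem (xs : List Int) (h : xs ≠ []) : pyPivot3 xs ∈ xs := by
  have hlen : 0 < xs.length := List.length_pos_iff.mpr h
  have h1 : pyPivot3 xs ∈ PySem.List.sorted
      [PySem.List.pyGetD xs 0 0,
       PySem.List.pyGetD xs (PySem.Int.floordiv ((xs.length : Nat) : Int) 2) 0,
       PySem.List.pyGetD xs (-1) 0] (fun y => y) false := by
    refine PySem.List.pyGetD_mem _ 0 ?_
    simp [PySem.Raise.InRange, PySem.List.length_sorted]
  rw [PySem.List.mem_sorted] at h1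
  have hmid : PySem.Raise.InRange xs.length (PySem.Int.floordiv ((xs.length : Nat) : Int) 2) := by
    simp [PySem.Raise.InRange, PySem.Int.floordiv, Int.fdiv_eq_ediv]; omega
  simp only [List.mem_cons, List.not_mem_nil, or_false] at h1
  rcases h1 with h1 | h1 | h1
  · rw [h1]; exact PySem.List.pyGetD_mem _ 0 (by simp [PySem.Raise.InRange]; omega)
  · rw [h1]; exact PySem.List.pyGetD_mem _ 0 hmid
  · rw [h1]
    rw [PySem.List.pyGetD_neg_one xs 0 h]
    exact List.getLast_mem h

theorem sorted_pairwise_lt_of_nodup (xs : List Int) (h : xs.Nodup) :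
    (PySem.List.sorted xs (fun x => x) false).Pairwise (· < ·) := by
  have hle := PySem.List.sorted_pairwise xs (fun x => x)
  have hnd : (PySem.List.sorted xs (fun x => x) false).Nodup :=
    (PySem.List.sorted_perm xs (fun x => x) false).nodup_iff.mpr h
  exact (hle.and hnd).imp (fun {a b} hab => lt_of_le_of_ne hab.1 hab.2)

-- quickselect computes the k-th element of the sorted order (distinct elements)
theorem pyQuickselectGo_eq_sorted (N : Nat) :
    ∀ (xs : List Int) (k : Nat), xs.length ≤ N → xs.Nodup → k < xs.length →
      pyQuickselectGo N xs k = (PySem.List.sorted xs (fun x => x) false).getD k 0 := by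
  induction N with
  | zero => intro xs k h1 _ h3; omega
  | succ N ih =>
    intro xs k h1 hnd hk
    rcases xs with _ | ⟨a, rest⟩
    · simp at hk
    · 
      set p := pyPivot3 (a :: rest) with hp
      have hpmem : p ∈ a :: rest := by
        rw [hp]; exact pyPivot3_mem _ (List.cons_ne_nil a rest)
      set L := (a :: rest).filter (fun y => decide (y < p)) with hL
      set G := (a :: rest).filter (fun y => decide (p < y)) with hG
      have hndL : L.Nodup := hnd.filter _
      have hndG : G.Nodup := hnd.filter _
      have hLlt : L.length < (a :: rest).length :=
        List.length_filter_lt_length_iff_exists.mpr ⟨p, hpmem, by simp⟩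
      have hndE : ((a :: rest).erase p).Nodup := hnd.erase p
      have hdisj : L.Disjoint G := by
        rw [List.disjoint_left]
        intro y hyL hyG
        have hy1 := List.of_mem_filter hyL
        have hy2 := List.of_mem_filter hyG
        simp at hy1 hy2; omega
      have hndLG : (L ++ G).Nodup := hndL.append hndG hdisj
      have hpermLG : (L ++ G).Perm ((a :: rest).erase p) := by
        rw [List.perm_ext_iff_of_nodup hndLG hndE]
        intro y
        rw [List.mem_append, hnd.mem_erase_iff, hL, hG]
        simp only [List.mem_filter, decide_eq_true_eq]
        constructor
        · rintro (⟨hm, hlt⟩ | ⟨hm, hgt⟩) <;> exact ⟨by omega, hm⟩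
        · rintro ⟨hne, hm⟩
          have hor : y < p ∨ p < y := by omega
          rcases hor with h | h
          · exact Or.inl ⟨hm, h⟩
          · exact Or.inr ⟨hm, h⟩
      set SL := PySem.List.sorted L (fun x => x) false with hSL
      set SG := PySem.List.sorted G (fun x => x) false with hSG
      have hlenSL : SL.length = L.length := PySem.List.length_sorted _ _ _
      have hlenSG : SG.length = G.length := PySem.List.length_sorted _ _ _
      have hpermys : (SL ++ p :: SG).Perm (a :: rest) := by
        have s1 : (SL ++ p :: SG).Perm (L ++ p :: G) :=
          (PySem.List.sorted_perm L _ _).append ((PySem.List.sorted_perm G _ _).cons p)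
        have s2 : (L ++ p :: G).Perm (p :: (L ++ G)) := List.perm_middle
        exact s1.trans (s2.trans ((hpermLG.cons p).trans (List.perm_cons_erase hpmem).symm))
      have hpairys : (SL ++ p :: SG).Pairwise (fun u v => (u : Int) < v) := by
        rw [List.pairwise_append]
        refine ⟨sorted_pairwise_lt_of_nodup L hndL, ?_, ?_⟩
        · rw [List.pairwise_cons]
          refine ⟨?_, sorted_pairwise_lt_of_nodup G hndG⟩
          intro b hb
          have hbG : b ∈ G := (PySem.List.mem_sorted _ _ _ _).mp hb
          have := List.of_mem_filter hbG
          simpa using this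
        · intro x hx b hb
          have hxL : x ∈ L := (PySem.List.mem_sorted _ _ _ _).mp hx
          have hxp : x < p := by simpa using List.of_mem_filter hxL
          rcases List.mem_cons.mp hb with rfl | hb
          · exact hxp
          · have hbG : b ∈ G := (PySem.List.mem_sorted _ _ _ _).mp hb
            have : p < b := by simpa using List.of_mem_filter hbG
            omega
      have hsorted : PySem.List.sorted (a :: rest) (fun x : Int => x) false = SL ++ p :: SG :=
        PySem.List.sorted_eq_of_perm_of_pairwise_lt _ _ _ hpermys hpairys
      have hlenrest : (a :: rest).length = L.length + G.length + 1 := by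
        have h2 := hpermLG.length_eq
        have h3 := List.length_erase_of_mem hpmem
        simp only [List.length_append] at h2
        have h4 : 0 < (a :: rest).length := by simp
        omega
      rw [hsorted]
      simp only [pyQuickselectGo]
      simp only [← hp, ← hL, ← hG]
      by_cases h2 : k < L.length
      · rw [if_pos h2]
        rw [ih L k (by omega) hndL h2]
        rw [List.getD_append _ _ _ _ (by omega)]
      · rw [if_neg h2]
        by_cases h3 : k = L.length
        · rw [if_pos h3]
          rw [List.getD_append_right _ _ _ _ (by omega)]
          simp [h3, hlenSL]
        · rw [if_neg h3]
          have hklt : k - L.length - 1 < G.length := by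
            simp only [List.length_cons] at hk hlenrest; omega
          rw [ih G (k - L.length - 1) (by omega) hndG hklt]
          rw [List.getD_append_right _ _ _ _ (by omega)]
          have h5 : k - SL.length = (k - L.length - 1) + 1 := by omega
          rw [h5, List.getD_cons_succ]

theorem pyQuickselect_eq_sorted (xs : List Int) (k : Nat) (hnd : xs.Nodup)
    (hk : k < xs.length) :
    pyQuickselect xs k = (PySem.List.sorted xs (fun x => x) false).getD k 0 :=
  pyQuickselectGo_eq_sorted xs.length xs k le_rfl hnd hk

theorem min_getD_eq_head (u : List Int) (h : u ≠ []) :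
    (PySem.List.min? u (fun x => x)).getD 0 =
      PySem.List.pyGetD (PySem.List.sorted u (fun x => x) false) 0 0 := by
  obtain ⟨m0, hm0⟩ : ∃ m0, PySem.List.min? u (fun x => x) = some m0 := by
    cases hc : PySem.List.min? u (fun x => x) with
    | none => exact absurd ((PySem.List.min?_eq_none_iff _ _).mp hc) h
    | some m0 => exact ⟨m0, rfl⟩
  have hvne : PySem.List.sorted u (fun x => x) false ≠ [] := by
    simp [PySem.List.sorted_eq_nil_iff, h]
  obtain ⟨m, t, hmt⟩ := List.exists_cons_of_ne_nil hvne
  rw [hm0, hmt, PySem.List.pyGetD_zero_cons]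
  have h1 : m0 ≤ m := PySem.List.min?_isMin hm0 m
    ((PySem.List.mem_sorted u _ false m).mp (hmt ▸ List.mem_cons_self))
  have h2 : m ≤ m0 := PySem.List.key_head_sorted_le u _ hmt m0 (PySem.List.min?_mem hm0)
  simpa using le_antisymm h1 h2

theorem max_getD_eq_last (u : List Int) (h : u ≠ []) :
    (PySem.List.max? u (fun x => x)).getD 0 =
      PySem.List.pyGetD (PySem.List.sorted u (fun x => x) false) (-1) 0 := by
  obtain ⟨m0, hm0⟩ : ∃ m0, PySem.List.max? u (fun x => x) = some m0 := by
    cases hc : PySem.List.max? u (fun x => x) with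
    | none => exact absurd ((PySem.List.max?_eq_none_iff _ _).mp hc) h
    | some m0 => exact ⟨m0, rfl⟩
  have hvne : PySem.List.sorted u (fun x => x) false ≠ [] := by
    simp [PySem.List.sorted_eq_nil_iff, h]
  set v := PySem.List.sorted u (fun x => x) false with hv
  rw [hm0, PySem.List.pyGetD_neg_one v 0 hvne]
  have hpair := PySem.List.sorted_pairwise u (fun x => x)
  rw [← hv] at hpair
  have hlast_mem : v.getLast hvne ∈ u :=
    (PySem.List.mem_sorted u _ false _).mp (List.getLast_mem hvne)
  have h1 : v.getLast hvne ≤ m0 := PySem.List.max?_isMax hm0 _ hlast_mem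
  have h2 : m0 ≤ v.getLast hvne := by
    have hm0v : m0 ∈ v := (PySem.List.mem_sorted u _ false m0).mpr (PySem.List.max?_mem hm0)
    obtain ⟨i, hi, hieq⟩ := List.mem_iff_getElem.mp hm0v
    rw [List.getLast_eq_getElem]
    rcases Nat.lt_or_ge i (v.length - 1) with hlt | hge
    · have := (List.pairwise_iff_getElem.mp hpair) i (v.length - 1) hi (by omega) hlt
      simpa [hieq] using this
    · have : i = v.length - 1 := by omega
      subst this; rw [hieq]
  exact le_antisymm h2 h1

theorem sorted_set_self (l : List Int) (hnd : l.Nodup) (hp : l.Pairwise (· ≤ ·)) :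
    PySem.List.sorted (PySem.Set.ofList l) (fun x => x) false = l := by
  rw [PySem.Set.ofList_eq_self_of_nodup l hnd]
  exact PySem.List.sorted_eq_self_of_pairwise l _ hp

theorem main_eq (t : List Int) (mc : Int) :
    pick_anchor_times_py t mc = pick_anchor_times_py_alt t mc := by
  unfold pick_anchor_times_py pick_anchor_times_py_alt
  simp only []
  set u := PySem.Set.ofList (t.filter (fun x => decide (0 ≤ x))) with hu
  set vals := PySem.List.sorted u (fun x => x) false with hvals
  by_cases hne : u = []
  · rw [hne] at hvals
    simp [hvals, hne, PySem.List.sorted_eq_nil_iff]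
  · have hvne : vals ≠ [] := by
      rw [hvals]; simpa [PySem.List.sorted_eq_nil_iff] using hne
    have hnd_u : u.Nodup := PySem.Set.nodup_ofList _
    have hlen : vals.length = u.length := by rw [hvals]; exact PySem.List.length_sorted _ _ _
    have hlt : vals.Pairwise (· < ·) := by rw [hvals]; exact sorted_pairwise_lt_of_nodup u hnd_u
    have hmax : max 1 mc = (if 1 < mc then mc else 1) := by
      by_cases h : 1 < mc
      · rw [if_pos h, max_eq_right (by omega)]
      · rw [if_neg h, max_eq_left (by omega)]
    rw [hmax, ← hlen]
    rw [if_neg hvne, if_neg hne]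
    set n : Int := if 1 < mc then mc else 1 with hn
    have hn1 : 1 ≤ n := by rw [hn]; split_ifs <;> omega
    by_cases hsmall : (vals.length : Int) ≤ n
    · rw [if_pos hsmall, if_pos hsmall]
    · rw [if_neg hsmall, if_neg hsmall]
      have hlen2 : 2 ≤ vals.length := by
        by_contra hc
        exact hsmall (by omega)
      have hlast : PySem.List.pyGetD vals (-1) 0 = vals.getLast hvne :=
        PySem.List.pyGetD_neg_one vals 0 hvne
      have hgetlast : vals.getLast hvne = vals[vals.length - 1]'(by omega) :=
        List.getLast_eq_getElem hvne
      have h0 : PySem.List.pyGetD vals 0 0 = vals[0]'(by omega) := by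
        have := PySem.List.pyGetD_eq_getElem vals (i := 0) 0 (by omega) (by omega)
        simpa using this
      have hlo : (PySem.List.min? u (fun x => x)).getD 0 = PySem.List.pyGetD vals 0 0 := by
        rw [hvals]; exact min_getD_eq_head u hne
      have hhi : (PySem.List.max? u (fun x => x)).getD 0 = PySem.List.pyGetD vals (-1) 0 := by
        rw [hvals]; exact max_getD_eq_last u hne
      have hpg := List.pairwise_iff_getElem.mp hlt
      by_cases hne1 : n = 1
      · have hc1 : ¬(3 ≤ n ∧ 3 ≤ vals.length) := by omega
        have hc2 : ¬(2 ≤ n) := by omega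
        rw [if_neg hc1, if_neg hc2, if_pos hne1]
        rw [hlo]
        exact sorted_set_self _ (by simp) (by simp)
      · by_cases hne2 : n = 2
        · have hc1 : ¬(3 ≤ n ∧ 3 ≤ vals.length) := by omega
          have hc2 : 2 ≤ n := by omega
          rw [if_neg hc1, if_pos hc2, if_neg hne1, if_pos hne2]
          rw [hlo, hhi]
          have hstrict : PySem.List.pyGetD vals 0 0 < PySem.List.pyGetD vals (-1) 0 := by
            rw [h0, hlast, hgetlast]
            exact hpg 0 (vals.length - 1) (by omega) (by omega) (by omega)
          refine sorted_set_self _ ?_ ?_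
          · simp; omega
          · simp; omega
        · have hn3 : 3 ≤ n := by omega
          have hlen4 : 4 ≤ vals.length := by
            by_contra hc
            exact hsmall (by omega)
          have hc1 : 3 ≤ n ∧ 3 ≤ vals.length := ⟨hn3, by omega⟩
          have hc2 : 2 ≤ n := by omega
          rw [if_pos hc1, if_pos hc2, if_neg hne1, if_neg hne2]
          rw [hlo, hhi]
          have hmid_idx : PySem.Int.floordiv (vals.length : Int) 2 = ((vals.length / 2 : Nat) : Int) := by
            simp [PySem.Int.floordiv, Int.fdiv_eq_ediv]
          have hmid : PySem.List.pyGetD vals (PySem.Int.floordiv (vals.length : Int) 2) 0 =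
              vals[vals.length / 2]'(by omega) := by
            rw [hmid_idx]
            exact PySem.List.pyGetD_ofNat vals (vals.length / 2) 0 (by omega)
          have hqs : pyQuickselect u (vals.length / 2) = vals[vals.length / 2]'(by omega) := by
            rw [pyQuickselect_eq_sorted u (vals.length / 2) hnd_u (by omega),
              ← hvals, List.getD_eq_getElem vals 0 (by omega)]
          rw [hqs, hmid]
          have h01 : vals[0]'(by omega) < vals[vals.length / 2]'(by omega) :=
            hpg 0 (vals.length / 2) (by omega) (by omega) (by omega)
          have h12 : vals[vals.length / 2]'(by omega) < vals[vals.length - 1]'(by omega) :=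
            hpg (vals.length / 2) (vals.length - 1) (by omega) (by omega) (by omega)
          rw [h0, hlast, hgetlast]
          refine sorted_set_self _ ?_ ?_
          · simp; omega
          · simp; omega

-- ===== VERDICT (by name: the statement is the Claim_ definition above) =====
theorem pick_anchor_times_py_spec : Claim_equal_pick_anchor_times_py := by
  intro times_ms max_count _
  exact main_eq times_ms max_count
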